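-- pv_equiv track=rewrite | github.com/chenyangh/TAG-waTer_pAper_nameoloGy | TAG.py | align_water_style
-- ===== SOURCE A (Python) =====
-- def align_water_style(cand, paper_name):
--     def find_all_index(cand_str, target_str):
--         return [i for i, x in enumerate(target_str) if x == cand_str]
--     aligned = {}
--     for i, char in enumerate(cand):
--         aligned[i] = []
--         for j, word in enumerate(paper_name.split()):
--             all_index = find_all_index(char, word)
--             if len(all_index) > 0:
--                 for idx in all_index:
--                     aligned[i].append((j, idx))
--     return aligned
-- ===== SOURCE B (Python) =====
-- def align_water_style(cand, paper_name):
--     positions = {}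
--     for j, word in enumerate(paper_name.split()):
--         for idx, ch in enumerate(word):
--             positions.setdefault(ch, []).append((j, idx))
--     return {i: list(positions.get(ch, [])) for i, ch in enumerate(cand)}
-- ===== Notes on version B (the rewrite author's own statement) =====
-- stated objective: faster
-- what changed: Instead of rescanning every word of paper_name for every character of cand, B builds a char -> [(word, idx)] index of paper_name in one pass and answers each cand character by a single dict lookup.
import Mathlib
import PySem

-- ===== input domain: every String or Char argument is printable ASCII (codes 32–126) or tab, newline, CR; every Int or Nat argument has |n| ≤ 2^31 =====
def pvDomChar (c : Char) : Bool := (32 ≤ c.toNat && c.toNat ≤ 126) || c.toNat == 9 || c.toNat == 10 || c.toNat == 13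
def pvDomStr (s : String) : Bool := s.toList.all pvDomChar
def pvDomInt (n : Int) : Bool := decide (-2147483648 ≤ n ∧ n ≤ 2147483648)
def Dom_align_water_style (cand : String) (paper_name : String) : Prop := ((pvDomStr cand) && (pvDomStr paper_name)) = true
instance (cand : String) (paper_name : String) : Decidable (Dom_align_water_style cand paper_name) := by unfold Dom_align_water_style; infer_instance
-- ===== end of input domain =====

-- B builds a char -> [(word, idx)] index of paper_name in one pass instead of rescanning all words per cand character (objective: faster).

-- ===== PORT A =====
def awsFindAllIndex (c : Char) (w : List Char) : List Int :=
  ((PySem.List.enumerate w).filter (fun p => p.2 == c)).map (·.1)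

def align_water_style (cand : String) (paper_name : String) : List (Int × List (Int × Int)) :=
  ((PySem.List.enumerate cand.toList).foldl (fun d ic =>
    (PySem.List.enumerate (PySem.Str.split₀ paper_name)).foldl (fun d jw =>
      let all_index := awsFindAllIndex ic.2 jw.2.toList
      if all_index.length > 0 then
        all_index.foldl (fun d idx => d.modify ic.1 [] (· ++ [(jw.1, idx)])) d
      else d)
      (d.insert ic.1 ([] : List (Int × Int))))
    PySem.Dict.empty).items

-- ===== PORT B =====
def awsPositions (words : List (Int × List Char)) : PySem.Dict Char (List (Int × Int)) :=
  words.foldl (fun d jw =>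
    (PySem.List.enumerate jw.2).foldl (fun d p => d.modify p.2 [] (· ++ [(jw.1, p.1)])) d)
    PySem.Dict.empty

def align_water_style_alt (cand : String) (paper_name : String) : List (Int × List (Int × Int)) :=
  let pos := awsPositions (PySem.List.enumerate ((PySem.Str.split₀ paper_name).map String.toList))
  (PySem.List.enumerate cand.toList).map (fun p => (p.1, pos.getD p.2 []))

-- ===== PRECONDITION & SPEC =====
def Spec_align_water_style (cand : String) (paper_name : String) (out : List (Int × List (Int × Int))) : Prop := out = align_water_style_alt cand paper_name
instance (cand : String) (paper_name : String) (out : List (Int × List (Int × Int))) : Decidable (Spec_align_water_style cand paper_name out) := by unfold Spec_align_water_style; infer_instance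

-- ===== CLAIM (what is proved, stated in full; the proofs are below) =====
def Claim_equal_align_water_style : Prop := ∀ (cand : String) (paper_name : String), Dom_align_water_style cand paper_name → Spec_align_water_style cand paper_name (align_water_style cand paper_name)

-- ===== LEMMAS AND PROOFS =====

-- the common per-character row: matches of c in the (already enumerated) word list, in order
def awsRow (c : Char) (W : List (Int × List Char)) : List (Int × Int) :=
  W.flatMap (fun jw => ((PySem.List.enumerate jw.2).filter (fun p => p.2 == c)).map (fun p => (jw.1, p.1)))

lemma aws_insert_foldl_modify (idxs : List Int) (d : PySem.Dict Int (List (Int × Int)))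
    (i : Int) (v : List (Int × Int)) (g : Int → (Int × Int)) :
    idxs.foldl (fun d idx => d.modify i [] (· ++ [g idx])) (d.insert i v)
      = d.insert i (v ++ idxs.map g) := by
  induction idxs generalizing v with
  | nil => simp
  | cons a t ih =>
    simp only [List.foldl_cons, List.map_cons]
    rw [show (d.insert i v).modify i [] (· ++ [g a]) = d.insert i (v ++ [g a]) by
      simp [PySem.Dict.modify, PySem.Dict.getD_insert_self, PySem.Dict.insert_insert_self],
      ih, List.append_assoc]
    simp

lemma aws_words_fold (c : Char) (i : Int) (W : List (Int × List Char))
    (d : PySem.Dict Int (List (Int × Int))) (v : List (Int × Int)) :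
    W.foldl (fun d jw =>
        let all_index := awsFindAllIndex c jw.2
        if all_index.length > 0 then
          all_index.foldl (fun d idx => d.modify i [] (· ++ [(jw.1, idx)])) d
        else d)
      (d.insert i v)
      = d.insert i (v ++ awsRow c W) := by
  induction W generalizing v with
  | nil => simp [awsRow]
  | cons jw t ih =>
    simp only [List.foldl_cons]
    by_cases h : (awsFindAllIndex c jw.2).length > 0
    · simp only [h, if_pos, aws_insert_foldl_modify, ih]
      simp [awsRow, awsFindAllIndex, List.append_assoc, List.map_map, Function.comp_def]
    · have hz : ((PySem.List.enumerate jw.2).filter (fun p => p.2 == c)) = [] := by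
        have h0 : awsFindAllIndex c jw.2 = [] := by
          cases hq : awsFindAllIndex c jw.2 with
          | nil => rfl
          | cons x xs => exact absurd (by simp [hq]) h
        simpa [awsFindAllIndex] using h0
      rw [if_neg h, ih]
      simp [awsRow, hz]

lemma aws_getD_positions (c : Char) (W : List (Int × List Char))
    (d : PySem.Dict Char (List (Int × Int))) :
    (W.foldl (fun d jw =>
        (PySem.List.enumerate jw.2).foldl (fun d p => d.modify p.2 [] (· ++ [(jw.1, p.1)])) d) d).getD c []
      = d.getD c [] ++ awsRow c W := by
  induction W generalizing d with
  | nil => simp [awsRow]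
  | cons jw t ih =>
    simp only [List.foldl_cons, ih]
    rw [show (PySem.List.enumerate jw.2).foldl (fun d p => d.modify p.2 [] (· ++ [(jw.1, p.1)])) d
        = ((PySem.List.enumerate jw.2).map (fun p => (p.2, ((jw.1 : Int), p.1)))).foldl
            (fun d q => d.modify q.1 [] (· ++ [q.2])) d by
      rw [List.foldl_map]]
    rw [PySem.Dict.getD_foldl_modify_append]
    simp [awsRow, List.filter_map, List.map_map, Function.comp_def, List.append_assoc]

lemma aws_enumerate_map {α β : Type} (f : α → β) (xs : List α) (s : Int) :
    PySem.List.enumerate (xs.map f) s = (PySem.List.enumerate xs s).map (fun p => (p.1, f p.2)) := by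
  induction xs generalizing s with
  | nil => simp [PySem.List.enumerate_nil]
  | cons x t ih => simp [PySem.List.enumerate_cons, ih]

-- ===== VERDICT (by name: the statement is the Claim_ definition above) =====
theorem align_water_style_spec : Claim_equal_align_water_style := by
  intro cand paper_name _
  unfold Spec_align_water_style align_water_style align_water_style_alt
  set W := PySem.List.enumerate (PySem.Str.split₀ paper_name) with hW
  have hstep : ∀ (d : PySem.Dict Int (List (Int × Int))) (ic : Int × Char),
      W.foldl (fun d jw =>
        let all_index := awsFindAllIndex ic.2 jw.2.toList
        if all_index.length > 0 then
          all_index.foldl (fun d idx => d.modify ic.1 [] (· ++ [(jw.1, idx)])) d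
        else d)
        (d.insert ic.1 ([] : List (Int × Int)))
      = d.insert ic.1 (awsRow ic.2 (W.map (fun jw => (jw.1, jw.2.toList)))) := by
    intro d ic
    have := aws_words_fold ic.2 ic.1 (W.map (fun jw => (jw.1, jw.2.toList))) d []
    rw [List.foldl_map] at this
    simpa using this
  rw [show (PySem.List.enumerate cand.toList).foldl (fun d ic =>
        W.foldl (fun d jw =>
          let all_index := awsFindAllIndex ic.2 jw.2.toList
          if all_index.length > 0 then
            all_index.foldl (fun d idx => d.modify ic.1 [] (· ++ [(jw.1, idx)])) d
          else d)
          (d.insert ic.1 ([] : List (Int × Int))))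
        PySem.Dict.empty
      = (PySem.List.enumerate cand.toList).foldl (fun d ic =>
          d.insert ic.1 (awsRow ic.2 (W.map (fun jw => (jw.1, jw.2.toList))))) PySem.Dict.empty by
    rw [funext fun d => funext fun ic => hstep d ic]]
  rw [PySem.Dict.items_foldl_insert_fresh]
  · -- both sides are maps over the same enumerate
    have hB : ∀ c : Char,
        (awsPositions (PySem.List.enumerate ((PySem.Str.split₀ paper_name).map String.toList))).getD c []
        = awsRow c (W.map (fun jw => (jw.1, jw.2.toList))) := by
      intro c
      unfold awsPositions
      rw [aws_getD_positions, aws_enumerate_map, ← hW]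
      simp
    show _ = (PySem.List.enumerate cand.toList).map
      (fun p => (p.1, (awsPositions (PySem.List.enumerate ((PySem.Str.split₀ paper_name).map String.toList))).getD p.2 []))
    rw [show (PySem.Dict.empty : PySem.Dict Int (List (Int × Int))).items = [] from rfl, List.nil_append]
    exact List.map_congr_left (fun p _ => by rw [hB p.2])
  · intro a _; exact PySem.Dict.contains_empty _
  · have hp := PySem.List.pairwise_lt_enumerate cand.toList (0 : Int)
    exact (List.pairwise_map.mpr (hp.imp (fun h => ne_of_lt h)))
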